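-- pv_equiv track=rewrite | github.com/Adexcoming/monetrax-deployment | backend/server.py | calculate_tax_readiness
-- ===== SOURCE A (Python) =====
-- def calculate_tax_readiness(transactions: list, has_tin: bool = False) -> int:
--     """Calculate tax readiness score (0-100)"""
--     score = 0
--
--     # Has transactions recorded (30 points)
--     if len(transactions) > 0:
--         score += 15
--     if len(transactions) > 10:
--         score += 15
--
--     # Has income recorded (25 points)
--     income_count = len([t for t in transactions if t.get("type") == "income"])
--     if income_count > 0:
--         score += 15
--     if income_count > 5:
--         score += 10
--
--     # Has expenses recorded (20 points)
--     expense_count = len([t for t in transactions if t.get("type") == "expense"])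
--     if expense_count > 0:
--         score += 10
--     if expense_count > 5:
--         score += 10
--
--     # Has TIN (15 points)
--     if has_tin:
--         score += 15
--
--     # Regular recording (10 points)
--     if len(transactions) > 0:
--         dates = [t.get("date") for t in transactions if t.get("date")]
--         if len(set(dates)) > 3:  # Multiple unique dates
--             score += 10
--
--     return min(score, 100)
-- ===== SOURCE B (Python) =====
-- def calculate_tax_readiness(transactions: list, has_tin: bool = False) -> int:
--     """Single pass: accumulate counts and unique dates, then apply the point ladder."""
--     n = 0
--     income = 0
--     expense = 0
--     dates = set()
--     for t in transactions:
--         n += 1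
--         ty = t.get("type")
--         if ty == "income":
--             income += 1
--         elif ty == "expense":
--             expense += 1
--         d = t.get("date")
--         if d:
--             dates.add(d)
--     score = (15 * (n > 0) + 15 * (n > 10)
--              + 15 * (income > 0) + 10 * (income > 5)
--              + 10 * (expense > 0) + 10 * (expense > 5)
--              + 15 * has_tin
--              + 10 * (len(dates) > 3))
--     return min(score, 100)
-- ===== Notes on version B (the rewrite author's own statement) =====
-- stated objective: simpler
-- what changed: Replaced the four separate scans over transactions (two len-comprehensions, a date comprehension plus set()) with one loop accumulating a count, income/expense counters and a set of truthy dates, then computes the score as one arithmetic sum of threshold indicators instead of a chain of conditional increments.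
import Mathlib
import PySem

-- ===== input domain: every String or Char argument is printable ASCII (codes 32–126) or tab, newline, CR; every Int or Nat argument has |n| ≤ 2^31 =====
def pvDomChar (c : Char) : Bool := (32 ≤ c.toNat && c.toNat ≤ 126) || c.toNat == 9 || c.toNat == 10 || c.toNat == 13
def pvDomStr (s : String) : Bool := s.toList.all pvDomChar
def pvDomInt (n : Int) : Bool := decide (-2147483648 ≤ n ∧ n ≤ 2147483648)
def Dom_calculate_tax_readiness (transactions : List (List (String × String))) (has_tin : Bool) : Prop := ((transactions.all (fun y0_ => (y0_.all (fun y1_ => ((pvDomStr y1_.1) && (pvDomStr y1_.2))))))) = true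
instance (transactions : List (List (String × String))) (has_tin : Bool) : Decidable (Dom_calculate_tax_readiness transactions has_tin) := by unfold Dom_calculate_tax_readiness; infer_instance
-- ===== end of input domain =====

-- B replaces A's four separate scans by one accumulating loop and one arithmetic point ladder (objective: simpler).

-- t.get(k) on a transaction dict (first-match association-list lookup)
def pvGet (t : List (String × String)) (k : String) : Option String :=
  (PySem.Dict.mk t).get? k

-- Python truthiness of t.get("date"): a non-empty string
def pvTruthy (o : Option String) : Bool :=
  match o with
  | some s => s ≠ ""
  | none => false

-- ===== PORT A =====
def calculate_tax_readiness (transactions : List (List (String × String))) (has_tin : Bool) : Int :=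
  let score : Int := 0
  let score := if transactions.length > 0 then score + 15 else score
  let score := if transactions.length > 10 then score + 15 else score
  let income_count := (transactions.filter (fun t => pvGet t "type" == some "income")).length
  let score := if income_count > 0 then score + 15 else score
  let score := if income_count > 5 then score + 10 else score
  let expense_count := (transactions.filter (fun t => pvGet t "type" == some "expense")).length
  let score := if expense_count > 0 then score + 10 else score
  let score := if expense_count > 5 then score + 10 else score
  let score := if has_tin then score + 15 else score
  let score :=
    if transactions.length > 0 then
      let dates := (transactions.filter (fun t => pvTruthy (pvGet t "date"))).map
        (fun t => (pvGet t "date").getD "")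
      if (PySem.Set.ofList dates).length > 3 then score + 10 else score
    else score
  min score 100

-- ===== PORT B =====
def pvStep (st : Int × Int × Int × PySem.Set String) (t : List (String × String)) :
    Int × Int × Int × PySem.Set String :=
  let (n, income, expense, ds) := st
  let n := n + 1
  let ty := pvGet t "type"
  let (income, expense) :=
    if ty == some "income" then (income + 1, expense)
    else if ty == some "expense" then (income, expense + 1)
    else (income, expense)
  let d := pvGet t "date"
  let ds := if pvTruthy d then PySem.Set.add ds (d.getD "") else ds
  (n, income, expense, ds)

def calculate_tax_readiness_alt (transactions : List (List (String × String))) (has_tin : Bool) : Int :=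
  let st := transactions.foldl pvStep (0, 0, 0, PySem.Set.empty)
  let score : Int :=
    (if st.1 > 0 then 15 else 0) + (if st.1 > 10 then 15 else 0)
    + (if st.2.1 > 0 then 15 else 0) + (if st.2.1 > 5 then 10 else 0)
    + (if st.2.2.1 > 0 then 10 else 0) + (if st.2.2.1 > 5 then 10 else 0)
    + (if has_tin then 15 else 0)
    + (if st.2.2.2.length > 3 then 10 else 0)
  min score 100

-- ===== PRECONDITION & SPEC =====
def Spec_calculate_tax_readiness (transactions : List (List (String × String))) (has_tin : Bool) (out : Int) : Prop := out = calculate_tax_readiness_alt transactions has_tin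
instance (transactions : List (List (String × String))) (has_tin : Bool) (out : Int) : Decidable (Spec_calculate_tax_readiness transactions has_tin out) := by unfold Spec_calculate_tax_readiness; infer_instance

-- ===== CLAIM (what is proved, stated in full; the proofs are below) =====
def Claim_equal_calculate_tax_readiness : Prop := ∀ (transactions : List (List (String × String))) (has_tin : Bool), Dom_calculate_tax_readiness transactions has_tin → Spec_calculate_tax_readiness transactions has_tin (calculate_tax_readiness transactions has_tin)

-- ===== LEMMAS AND PROOFS =====

-- the single pass accumulates exactly A's four scan results
theorem pv_fold_char (ts : List (List (String × String))) (n income expense : Int)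
    (ds : PySem.Set String) :
    ts.foldl pvStep (n, income, expense, ds) =
      (n + ts.length,
       income + ((ts.filter (fun t => pvGet t "type" == some "income")).length : Int),
       expense + ((ts.filter (fun t => pvGet t "type" == some "expense")).length : Int),
       PySem.Set.update ds
         ((ts.filter (fun t => pvTruthy (pvGet t "date"))).map (fun t => (pvGet t "date").getD ""))) := by
  induction ts generalizing n income expense ds with
  | nil => simp [PySem.Set.update]
  | cons t ts ih =>
    simp only [List.foldl_cons, pvStep, List.filter_cons]
    by_cases hinc : pvGet t "type" == some "income"
    · have hexp : ¬ (pvGet t "type" == some "expense") := by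
        simp only [beq_iff_eq] at hinc ⊢; simp [hinc]
      by_cases hd : pvTruthy (pvGet t "date") <;>
        simp [hinc, hexp, hd, ih, PySem.Set.update, Prod.ext_iff] <;>
        (try constructor) <;> (first | omega | trivial)
    · by_cases hexp : pvGet t "type" == some "expense" <;>
        by_cases hd : pvTruthy (pvGet t "date") <;>
        simp [hinc, hexp, hd, ih, PySem.Set.update, Prod.ext_iff] <;>
        (try constructor) <;> (first | omega | trivial)

-- set.update from the empty set is set(xs)
theorem pv_update_empty (xs : List String) :
    PySem.Set.update PySem.Set.empty xs = PySem.Set.ofList xs := by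
  simp [PySem.Set.update, PySem.Set.ofList_eq_foldl, PySem.Set.empty]

-- conditional increment 'if c: s += k' as an addition
theorem pv_step_ite (c : Prop) [Decidable c] (s k : Int) :
    (if c then s + k else s) = s + (if c then k else 0) := by
  split_ifs <;> omega

-- ===== VERDICT (by name: the statement is the Claim_ definition above) =====
set_option maxHeartbeats 1000000 in
theorem calculate_tax_readiness_spec : Claim_equal_calculate_tax_readiness := by
  intro ts has_tin _
  unfold Spec_calculate_tax_readiness calculate_tax_readiness calculate_tax_readiness_alt
  rw [pv_fold_char, pv_update_empty]
  cases ts with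
  | nil => cases has_tin <;> rfl
  | cons t ts' =>
    dsimp only [List.length_cons]
    generalize (List.filter (fun t => pvGet t "type" == some "income") (t :: ts')).length = ic
    generalize (List.filter (fun t => pvGet t "type" == some "expense") (t :: ts')).length = ec
    generalize (PySem.Set.ofList (List.map (fun t => (pvGet t "date").getD "") (List.filter (fun t => pvTruthy (pvGet t "date")) (t :: ts')))).length = dl
    have cic0 : ((0:Int) + (ic:Int) > 0) ↔ ic > 0 := by omega
    have cic5 : ((0:Int) + (ic:Int) > 5) ↔ ic > 5 := by omega
    have cec0 : ((0:Int) + (ec:Int) > 0) ↔ ec > 0 := by omega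
    have cec5 : ((0:Int) + (ec:Int) > 5) ↔ ec > 5 := by omega
    have clen0 : ((0:Int) + ((ts'.length + 1 : Nat):Int) > 0) ↔ ts'.length + 1 > 0 := by omega
    have clen10 : ((0:Int) + ((ts'.length + 1 : Nat):Int) > 10) ↔ ts'.length + 1 > 10 := by omega
    simp only [cic0, cic5, cec0, cec5, clen0, clen10, pv_step_ite]
    cases has_tin <;> split_ifs <;> omega
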